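-- pv_equiv track=rewrite | github.com/trac3er00/OMG | tests/perf/test_performance_v2.py | _make_secret_paths
-- ===== SOURCE A (Python) =====
-- def _make_secret_paths(count: int) -> list[str]:
--     """Generate a mix of secret and non-secret file paths."""
--     patterns = [
--         "/app/src/main.py",
--         "/app/.env",
--         "/app/.env.production",
--         "/app/.env.example",
--         "/app/config/database.yml",
--         "/home/user/.ssh/id_rsa",
--         "/app/credentials.json",
--         "/app/src/utils.py",
--         "/app/.aws/config",
--         "/app/secrets/api_key.txt",
--         "/app/src/components/Button.tsx",
--         "/app/tokens.json",
--         "/app/key.pem",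
--         "/app/.kube/config",
--         "/app/src/index.ts",
--     ]
--     result: list[str] = []
--     while len(result) < count:
--         result.extend(patterns)
--     return result[:count]
-- ===== SOURCE B (Python) =====
-- def _make_secret_paths(count: int) -> list[str]:
--     """Generate a mix of secret and non-secret file paths."""
--     patterns = [
--         "/app/src/main.py",
--         "/app/.env",
--         "/app/.env.production",
--         "/app/.env.example",
--         "/app/config/database.yml",
--         "/home/user/.ssh/id_rsa",
--         "/app/credentials.json",
--         "/app/src/utils.py",
--         "/app/.aws/config",
--         "/app/secrets/api_key.txt",
--         "/app/src/components/Button.tsx",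
--         "/app/tokens.json",
--         "/app/key.pem",
--         "/app/.kube/config",
--         "/app/src/index.ts",
--     ]
--     return [patterns[i % len(patterns)] for i in range(count)]
-- ===== Notes on version B (the rewrite author's own statement) =====
-- stated objective: simpler
-- what changed: Replaces the overshoot-and-truncate while loop (extend by whole pattern chunks, then slice) with a direct per-index comprehension that reads patterns[i % len(patterns)] for each output position.
import Mathlib
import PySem

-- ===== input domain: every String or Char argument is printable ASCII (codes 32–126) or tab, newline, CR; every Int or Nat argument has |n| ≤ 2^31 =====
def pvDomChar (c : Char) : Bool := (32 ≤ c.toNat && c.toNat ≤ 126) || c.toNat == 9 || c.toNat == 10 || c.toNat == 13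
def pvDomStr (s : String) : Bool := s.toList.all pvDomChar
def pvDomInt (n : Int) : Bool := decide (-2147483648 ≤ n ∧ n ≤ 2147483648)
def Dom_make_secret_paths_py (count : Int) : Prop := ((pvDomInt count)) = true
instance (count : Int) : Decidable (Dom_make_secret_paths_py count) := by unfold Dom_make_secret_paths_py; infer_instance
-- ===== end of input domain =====

-- B replaces A's overshoot-and-truncate while loop by a per-index comprehension over range(count)
-- with a modulo lookup into the same fixed pattern list; same O(count) cost, simpler structure.

-- ===== PORT A =====
-- the fixed pattern list shared (as a literal) by both Pythons
def pvPats : List String :=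
  ["/app/src/main.py", "/app/.env", "/app/.env.production", "/app/.env.example",
   "/app/config/database.yml", "/home/user/.ssh/id_rsa", "/app/credentials.json",
   "/app/src/utils.py", "/app/.aws/config", "/app/secrets/api_key.txt",
   "/app/src/components/Button.tsx", "/app/tokens.json", "/app/key.pem",
   "/app/.kube/config", "/app/src/index.ts"]

-- A's while loop: extend result by the whole pattern list until len(result) >= count
def pvLoopA (count : Int) (result : List String) : List String :=
  if (result.length : Int) < count then pvLoopA count (result ++ pvPats) else result
termination_by (count - result.length).toNat
decreasing_by
  simp only [List.length_append]
  have : (pvPats.length : Int) = 15 := by decide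
  omega

def make_secret_paths_py (count : Int) : List String :=
  PySem.List.slice (pvLoopA count []) none (some count)

-- ===== PORT B =====
def make_secret_paths_py_alt (count : Int) : List String :=
  (PySem.List.pyRange 0 count 1).map
    (fun i => PySem.List.pyGetD pvPats (PySem.Int.mod i (pvPats.length : Int)) "")

-- ===== PRECONDITION & SPEC =====
def Spec_make_secret_paths_py (count : Int) (out : List String) : Prop := out = make_secret_paths_py_alt count
instance (count : Int) (out : List String) : Decidable (Spec_make_secret_paths_py count out) := by unfold Spec_make_secret_paths_py; infer_instance

-- ===== CLAIM (what is proved, stated in full; the proofs are below) =====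
def Claim_equal_make_secret_paths_py : Prop := ∀ (count : Int), Dom_make_secret_paths_py count → Spec_make_secret_paths_py count (make_secret_paths_py count)

-- ===== LEMMAS AND PROOFS =====

-- pvPats repeated k times (the shape of A's accumulator)
def pvRep : Nat → List String
  | 0 => []
  | k + 1 => pvPats ++ pvRep k

theorem pvRep_append (k : Nat) : pvRep k ++ pvPats = pvPats ++ pvRep k := by
  induction k with
  | zero => simp [pvRep]
  | succ k ih => simp only [pvRep, List.append_assoc, ih]

theorem pvPats_length : pvPats.length = 15 := by decide

theorem pvRep_length (k : Nat) : (pvRep k).length = 15 * k := by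
  induction k with
  | zero => simp [pvRep]
  | succ k ih => simp [pvRep, ih, pvPats_length]; omega

theorem pvRep_getD (k j : Nat) (h : j < 15 * k) :
    (pvRep k).getD j "" = pvPats.getD (j % 15) "" := by
  induction k generalizing j with
  | zero => omega
  | succ k ih =>
    by_cases hj : j < 15
    · have heq : j % 15 = j := Nat.mod_eq_of_lt hj
      rw [heq]
      simp only [pvRep]
      rw [List.getD_eq_getElem?_getD, List.getElem?_append_left (by rw [pvPats_length]; omega),
          ← List.getD_eq_getElem?_getD]
    · have h15 : j - 15 < 15 * k := by omega
      have hmod : (j - 15) % 15 = j % 15 := by omega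
      simp only [pvRep]
      rw [List.getD_eq_getElem?_getD, List.getElem?_append_right (by rw [pvPats_length]; omega)]
      rw [pvPats_length, ← List.getD_eq_getElem?_getD, ih _ h15, hmod]

theorem pvRep_take (k n : Nat) (h : n ≤ 15 * k) :
    (pvRep k).take n = (List.range n).map (fun j => pvPats.getD (j % 15) "") := by
  apply List.ext_getElem
  · simp [pvRep_length]; omega
  · intro i h1 h2
    simp only [List.getElem_take, List.getElem_map, List.getElem_range]
    have hi : i < n := by simp [pvRep_length] at h1; omega
    have := pvRep_getD k i (by omega)
    rw [List.getD_eq_getElem?_getD, List.getD_eq_getElem?_getD] at this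
    have hlt : i < (pvRep k).length := by rw [pvRep_length]; omega
    have hlt2 : i % 15 < pvPats.length := by rw [pvPats_length]; omega
    simpa [List.getElem?_eq_getElem, hlt, hlt2] using this

theorem pvLoopA_rep (count : Int) :
    ∀ t (m : Nat), (count - 15 * (m : Int)).toNat ≤ t →
      ∃ k, pvLoopA count (pvRep m) = pvRep k ∧ count ≤ 15 * k := by
  intro t
  induction t with
  | zero =>
    intro m hm
    refine ⟨m, ?_, by omega⟩
    rw [pvLoopA]
    simp only [pvRep_length]
    split
    · omega
    · rfl
  | succ t ih =>
    intro m hm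
    rw [pvLoopA]
    simp only [pvRep_length]
    split
    · rename_i hlt
      rw [pvRep_append]
      have := ih (m + 1) (by push_cast at hlt ⊢; omega)
      simpa [pvRep] using this
    · exact ⟨m, rfl, by omega⟩

-- B's port, written as a map over Nat range
theorem alt_eq_range (count : Int) :
    make_secret_paths_py_alt count =
      (List.range count.toNat).map (fun j => pvPats.getD (j % 15) "") := by
  unfold make_secret_paths_py_alt
  rw [PySem.List.pyRange_one]
  rw [List.map_map]
  simp only [sub_zero]
  apply List.map_congr_left
  intro j _
  simp only [Function.comp, zero_add, pvPats_length]
  rw [PySem.Int.mod_natCast, PySem.List.pyGetD_natCast]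

-- ===== VERDICT (by name: the statement is the Claim_ definition above) =====
theorem make_secret_paths_py_spec : Claim_equal_make_secret_paths_py := by
  intro count _
  unfold Spec_make_secret_paths_py make_secret_paths_py
  rw [alt_eq_range]
  by_cases hc : count ≤ 0
  · rw [show ([] : List String) = pvRep 0 from rfl, pvLoopA]
    simp only [pvRep_length]
    have : count.toNat = 0 := by omega
    rw [this]
    split
    · omega
    · simp [pvRep, PySem.List.slice, PySem.List.clampIdx]
  · obtain ⟨k, hk, hk2⟩ := pvLoopA_rep count (count - 0).toNat 0 (by omega)
    rw [show ([] : List String) = pvRep 0 from rfl, hk,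
        PySem.List.slice_to _ (by omega)]
    exact pvRep_take k count.toNat (by omega)
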